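-- pv_equiv track=rewrite | github.com/moscicky/qdrl | qdrl/triplets.py | batch_negative_triplets_mask
-- ===== SOURCE A (Python) =====
-- from typing import Tuple, List
--
-- def batch_negative_triplets_mask(
--         batch_size: int,
--         negatives_count: int) -> [List[int], List[int], List[int]]:
--     anchor_mask = []
--     positive_mask = []
--     negative_mask = []
--     for anchor_idx in range(0, batch_size):
--         for positive_idx in range(0, batch_size):
--             # select top min(negatives_count, batch_size - 1) positives as negatives
--             if anchor_idx != positive_idx and positive_idx <= negatives_count and positive_idx < batch_size:
--                 anchor_mask.append(anchor_idx)
--                 positive_mask.append(anchor_idx)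
--                 negative_mask.append(positive_idx)
--     return anchor_mask, positive_mask, negative_mask
-- ===== SOURCE B (Python) =====
-- from typing import Tuple, List
--
-- def batch_negative_triplets_mask(
--         batch_size: int,
--         negatives_count: int) -> [List[int], List[int], List[int]]:
--     # candidate bound: indices 0..negatives_count inclusive, clamped to the batch
--     c = max(0, min(negatives_count + 1, batch_size))
--     anchor_mask = []
--     positive_mask = []
--     negative_mask = []
--     for anchor in range(batch_size):
--         negs = list(range(0, min(anchor, c))) + list(range(anchor + 1, c))
--         anchor_mask.extend([anchor] * len(negs))
--         positive_mask.extend([anchor] * len(negs))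
--         negative_mask.extend(negs)
--     return anchor_mask, positive_mask, negative_mask
-- ===== Notes on version B (the rewrite author's own statement) =====
-- stated objective: faster
-- what changed: Replaces the nested batch_size x batch_size filter loop by computing the candidate bound c = max(0, min(negatives_count+1, batch_size)) once and emitting each anchor's negatives directly as the two contiguous ranges [0,min(anchor,c)) and [anchor+1,c), so per-anchor work is proportional to the output instead of to batch_size.
import Mathlib
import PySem

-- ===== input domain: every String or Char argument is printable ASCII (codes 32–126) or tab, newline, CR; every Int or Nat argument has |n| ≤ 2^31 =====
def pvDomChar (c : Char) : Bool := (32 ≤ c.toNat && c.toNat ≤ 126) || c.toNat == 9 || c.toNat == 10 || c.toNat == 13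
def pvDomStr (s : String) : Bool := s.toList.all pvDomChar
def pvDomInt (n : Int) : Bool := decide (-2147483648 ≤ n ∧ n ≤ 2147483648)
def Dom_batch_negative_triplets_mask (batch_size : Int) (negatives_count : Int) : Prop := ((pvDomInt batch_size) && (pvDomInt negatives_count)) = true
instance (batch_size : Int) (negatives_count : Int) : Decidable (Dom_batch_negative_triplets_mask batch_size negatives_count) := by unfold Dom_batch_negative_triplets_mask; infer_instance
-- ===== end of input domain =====

-- B replaces A's nested filter loop by a precomputed candidate bound c and two contiguous
-- ranges per anchor (work proportional to the output instead of batch_size per anchor).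

-- ===== PORT A =====
-- nested loop: for anchor_idx in range(batch_size): for positive_idx in range(batch_size): if …
def batch_negative_triplets_mask (batch_size : Int) (negatives_count : Int) : List Int × List Int × List Int :=
  (PySem.List.pyRange 0 batch_size 1).foldl
    (fun st anchor_idx =>
      (PySem.List.pyRange 0 batch_size 1).foldl
        (fun st positive_idx =>
          if anchor_idx ≠ positive_idx ∧ positive_idx ≤ negatives_count ∧ positive_idx < batch_size then
            (st.1 ++ [anchor_idx], st.2.1 ++ [anchor_idx], st.2.2 ++ [positive_idx])
          else st)
        st)
    ([], [], [])

-- ===== PORT B =====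
-- c computed once; per anchor the negatives are the two ranges [0, min anchor c) ++ [anchor+1, c)
def batch_negative_triplets_mask_alt (batch_size : Int) (negatives_count : Int) : List Int × List Int × List Int :=
  let c := max 0 (min (negatives_count + 1) batch_size)
  (PySem.List.pyRange 0 batch_size 1).foldl
    (fun st anchor =>
      let negs := PySem.List.pyRange 0 (min anchor c) 1 ++ PySem.List.pyRange (anchor + 1) c 1
      (st.1 ++ negs.map (fun _ => anchor), st.2.1 ++ negs.map (fun _ => anchor), st.2.2 ++ negs))
    ([], [], [])

-- ===== PRECONDITION & SPEC =====
def Spec_batch_negative_triplets_mask (batch_size : Int) (negatives_count : Int) (out : List Int × List Int × List Int) : Prop := out = batch_negative_triplets_mask_alt batch_size negatives_count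
instance (batch_size : Int) (negatives_count : Int) (out : List Int × List Int × List Int) : Decidable (Spec_batch_negative_triplets_mask batch_size negatives_count out) := by unfold Spec_batch_negative_triplets_mask; infer_instance

-- ===== CLAIM (what is proved, stated in full; the proofs are below) =====
def Claim_equal_batch_negative_triplets_mask : Prop := ∀ (batch_size : Int) (negatives_count : Int), Dom_batch_negative_triplets_mask batch_size negatives_count → Spec_batch_negative_triplets_mask batch_size negatives_count (batch_negative_triplets_mask batch_size negatives_count)

-- ===== LEMMAS AND PROOFS =====

-- A's inner loop appends (filtered positives mapped to the anchor, …, filtered positives) to the state.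
lemma inner_foldl_eq (a n b : Int) (xs : List Int) (st : List Int × List Int × List Int) :
    xs.foldl
      (fun st p =>
        if a ≠ p ∧ p ≤ n ∧ p < b then (st.1 ++ [a], st.2.1 ++ [a], st.2.2 ++ [p]) else st)
      st
    = (st.1 ++ (xs.filter (fun p => decide (a ≠ p ∧ p ≤ n ∧ p < b))).map (fun _ => a),
       st.2.1 ++ (xs.filter (fun p => decide (a ≠ p ∧ p ≤ n ∧ p < b))).map (fun _ => a),
       st.2.2 ++ xs.filter (fun p => decide (a ≠ p ∧ p ≤ n ∧ p < b))) := by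
  induction xs generalizing st with
  | nil => simp
  | cons x xs ih =>
      simp only [List.foldl_cons, List.filter_cons]
      by_cases h : a ≠ x ∧ x ≤ n ∧ x < b
      · rw [if_pos h, ih]; simp [h]
      · rw [if_neg h, ih]; simp [h]

-- the filtered candidate list equals B's two contiguous ranges
lemma filter_eq_ranges (a n b : Int) (ha0 : 0 ≤ a) (hab : a < b) :
    (PySem.List.pyRange 0 b 1).filter
      (fun p => decide (a ≠ p ∧ p ≤ n ∧ p < b))
    = PySem.List.pyRange 0 (min a (max 0 (min (n + 1) b))) 1
      ++ PySem.List.pyRange (a + 1) (max 0 (min (n + 1) b)) 1 := by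
  set c : Int := max 0 (min (n + 1) b) with hc
  have hc0 : 0 ≤ c := le_max_left _ _
  have hcb : c ≤ b := by omega
  rw [PySem.List.pyRange_one_append 0 c b hc0 hcb, List.filter_append]
  have h2 : (PySem.List.pyRange c b 1).filter (fun p => decide (a ≠ p ∧ p ≤ n ∧ p < b)) = [] := by
    rw [List.filter_eq_nil_iff]
    intro p hp
    rw [PySem.List.mem_pyRange_one] at hp
    simp only [decide_eq_true_eq, not_and]
    intro _ hpn; omega
  rw [h2, List.append_nil]
  have h1 : (PySem.List.pyRange 0 c 1).filter (fun p => decide (a ≠ p ∧ p ≤ n ∧ p < b))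
      = (PySem.List.pyRange 0 c 1).filter (fun p => decide (a ≠ p)) := by
    apply List.filter_congr
    intro p hp
    rw [PySem.List.mem_pyRange_one] at hp
    simp only [decide_eq_decide]
    constructor <;> intro h
    · exact h.1
    · exact ⟨h, by omega, by omega⟩
  rw [h1]
  by_cases hlt : a < c
  · have hmin : min a c = a := by omega
    rw [hmin, PySem.List.pyRange_one_append 0 a c ha0 (by omega), List.filter_append]
    have hl : (PySem.List.pyRange 0 a 1).filter (fun p => decide (a ≠ p)) = PySem.List.pyRange 0 a 1 := by
      rw [List.filter_eq_self]
      intro p hp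
      rw [PySem.List.mem_pyRange_one] at hp
      simp only [decide_eq_true_eq]; omega
    have hr : (PySem.List.pyRange a c 1).filter (fun p => decide (a ≠ p)) = PySem.List.pyRange (a + 1) c 1 := by
      rw [PySem.List.pyRange_one_cons hlt]
      simp only [List.filter_cons]
      rw [if_neg (by simp), List.filter_eq_self.mpr]
      intro p hp
      rw [PySem.List.mem_pyRange_one] at hp
      simp only [decide_eq_true_eq]; omega
    rw [hl, hr]
  · have hmin : min a c = c := by omega
    have hr : PySem.List.pyRange (a + 1) c 1 = [] := PySem.List.pyRange_one_eq_nil (by omega)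
    rw [hmin, hr, List.append_nil, List.filter_eq_self]
    intro p hp
    rw [PySem.List.mem_pyRange_one] at hp
    simp only [decide_eq_true_eq]; omega

-- ===== VERDICT (by name: the statement is the Claim_ definition above) =====
theorem batch_negative_triplets_mask_spec : Claim_equal_batch_negative_triplets_mask := by
  intro b n _
  unfold Spec_batch_negative_triplets_mask batch_negative_triplets_mask batch_negative_triplets_mask_alt
  apply PySem.List.foldl_congr_mem
  intro st a ha
  rw [PySem.List.mem_pyRange_one] at ha
  rw [inner_foldl_eq, filter_eq_ranges a n b ha.1 ha.2]
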